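-- pv_equiv track=rewrite | github.com/mich181189/Tildagon-ArtNet | artnet.py | _parse_addr
-- ===== SOURCE A (Python) =====
-- def _parse_addr(addr):
--     out = [0,0,0,0]
--     idx = 0
--     scratch = ''
--     for c in addr:
--         if c == '.':
--             out[idx] = int(scratch)
--             idx += 1
--             scratch = ''
--         else:
--             scratch += c
--     out[idx] = int(scratch)
--     return out
-- ===== SOURCE B (Python) =====
-- def _parse_addr(addr):
--     out = [0, 0, 0, 0]
--     for i, tok in enumerate(addr.split('.')):
--         out[i] = int(tok)
--     return out
-- ===== Notes on version B (the rewrite author's own statement) =====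
-- stated objective: idiomatic
-- what changed: Replaced A's char-by-char scan with a manual scratch accumulator by an idiomatic tokenize pass: split the address on '.' once and fill the fixed [0,0,0,0] list from enumerate(parts).
import Mathlib
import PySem

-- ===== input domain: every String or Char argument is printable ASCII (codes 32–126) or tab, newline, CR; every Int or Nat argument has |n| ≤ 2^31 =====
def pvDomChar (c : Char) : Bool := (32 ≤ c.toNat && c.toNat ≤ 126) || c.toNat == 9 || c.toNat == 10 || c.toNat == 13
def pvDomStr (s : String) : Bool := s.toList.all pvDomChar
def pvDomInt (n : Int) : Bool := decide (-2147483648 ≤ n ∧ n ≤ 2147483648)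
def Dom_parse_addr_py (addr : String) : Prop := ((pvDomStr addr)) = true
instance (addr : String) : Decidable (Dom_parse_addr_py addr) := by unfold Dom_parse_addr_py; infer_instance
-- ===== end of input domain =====

-- B replaces A's char-by-char accumulator scan with an idiomatic split('.')-then-fill over enumerated tokens; same values everywhere A returns.

-- out[i] = v for a Python list of ints; exact for 0 ≤ i (both loops only ever use indices ≥ 0); none = IndexError
def pvSetItem? (xs : List Int) (i : Int) (v : Int) : Option (List Int) :=
  if 0 ≤ i ∧ i < (xs.length : Int) then some (xs.set i.toNat v) else none

-- ===== PORT A =====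
-- loop body of A: on '.', flush scratch via int() and store at idx; else append c to scratch; none = raised
def pvStepA (st : Option (List Int × Int × List Char)) (c : Char) : Option (List Int × Int × List Char) :=
  match st with
  | none => none
  | some (out, idx, scratch) =>
    if c = '.' then
      match PySem.Int.ofChars? scratch with
      | none => none
      | some v =>
        match pvSetItem? out idx v with
        | none => none
        | some out' => some (out', idx + 1, [])
    else some (out, idx, scratch ++ [c])

-- A's final 'out[idx] = int(scratch); return out'
def pvFinishA (st : Option (List Int × Int × List Char)) : Option (List Int) :=
  match st with
  | none => none
  | some (out, idx, scratch) =>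
    match PySem.Int.ofChars? scratch with
    | none => none
    | some v => pvSetItem? out idx v

def parse_addr_py (addr : String) : List Int :=
  (pvFinishA (addr.toList.foldl pvStepA (some ([0, 0, 0, 0], 0, [])))).getD []

-- ===== PORT B =====
-- loop body of B: 'out[i] = int(tok)' for (i, tok) from enumerate(addr.split('.'))
def pvStepB (st : Option (List Int)) (p : Int × List Char) : Option (List Int) :=
  match st with
  | none => none
  | some out =>
    match PySem.Int.ofChars? p.2 with
    | none => none
    | some v => pvSetItem? out p.1 v

def parse_addr_py_alt (addr : String) : List Int :=
  ((PySem.List.enumerate (PySem.Chars.splitOn addr.toList ['.']) 0).foldl pvStepB (some [0, 0, 0, 0])).getD []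

-- ===== PRECONDITION & SPEC =====
-- exactly the inputs on which A returns: at most 4 dot-separated fields and every field a valid int() literal
-- (otherwise A raises IndexError resp. ValueError)
def Pre_parse_addr_py (addr : String) : Prop :=
  (PySem.Chars.splitOn addr.toList ['.']).length ≤ 4 ∧
  ∀ p ∈ PySem.Chars.splitOn addr.toList ['.'], (PySem.Int.ofChars? p).isSome = true
instance (addr : String) : Decidable (Pre_parse_addr_py addr) := by unfold Pre_parse_addr_py; infer_instance

def pvWitness_parse_addr_py : String := "10.0.0.1"

def Spec_parse_addr_py (addr : String) (out : List Int) : Prop := out = parse_addr_py_alt addr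
instance (addr : String) (out : List Int) : Decidable (Spec_parse_addr_py addr out) := by unfold Spec_parse_addr_py; infer_instance

-- ===== CLAIM (what is proved, stated in full; the proofs are below) =====
def Claim_equal_parse_addr_py : Prop := ∀ (addr : String), Dom_parse_addr_py addr → Pre_parse_addr_py addr → Spec_parse_addr_py addr (parse_addr_py addr)

-- ===== LEMMAS AND PROOFS =====

-- reference tokenizer: split a char list on '.', with pre the accumulated current field
def pvSplitDot (pre : List Char) : List Char → List (List Char)
  | [] => [pre]
  | c :: rest => if c = '.' then pre :: pvSplitDot [] rest else pvSplitDot (pre ++ [c]) rest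

-- reference consumer: store int(t) at successive indices
def pvGo (parts : List (List Char)) (out : List Int) (idx : Int) : Option (List Int) :=
  match parts with
  | [] => some out
  | t :: ts =>
    match PySem.Int.ofChars? t with
    | none => none
    | some v =>
      match pvSetItem? out idx v with
      | none => none
      | some out' => pvGo ts out' (idx + 1)

lemma splitOn_go_eq (fuel : Nat) :
    ∀ (l cur : List Char) (acc : List (List Char)), l.length < fuel →
      PySem.Chars.splitOn.go ['.'] fuel l cur acc = acc.reverse ++ pvSplitDot cur.reverse l := by
  induction fuel with
  | zero => intro l cur acc h; omega
  | succ n ih =>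
    intro l cur acc h
    cases l with
    | nil => simp [PySem.Chars.splitOn.go, pvSplitDot]
    | cons c rest =>
      by_cases hc : c = '.'
      · subst hc
        have hgo : PySem.Chars.splitOn.go ['.'] (n+1) ('.' :: rest) cur acc
            = PySem.Chars.splitOn.go ['.'] n rest [] (cur.reverse :: acc) := by
          simp [PySem.Chars.splitOn.go, List.isPrefixOf]
        rw [hgo, ih rest [] (cur.reverse :: acc) (by simpa using Nat.lt_of_succ_lt_succ h)]
        simp [pvSplitDot]
      · have hne : ('.' == c) = false := beq_eq_false_iff_ne.mpr (Ne.symm hc)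
        have hgo : PySem.Chars.splitOn.go ['.'] (n+1) (c :: rest) cur acc
            = PySem.Chars.splitOn.go ['.'] n rest (c :: cur) acc := by
          simp [PySem.Chars.splitOn.go, List.isPrefixOf, hne]
        rw [hgo, ih rest (c :: cur) acc (by simpa using Nat.lt_of_succ_lt_succ h)]
        simp [pvSplitDot, hc]

lemma splitOn_eq_pvSplitDot (l : List Char) :
    PySem.Chars.splitOn l ['.'] = pvSplitDot [] l := by
  have := splitOn_go_eq (l.length + 1) l [] [] (Nat.lt_succ_self _)
  simpa [PySem.Chars.splitOn] using this

lemma foldl_stepA_none (cs : List Char) : cs.foldl pvStepA none = none := by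
  induction cs with
  | nil => rfl
  | cons c cs ih => simpa [pvStepA] using ih

lemma foldl_stepB_none (ps : List (Int × List Char)) : ps.foldl pvStepB none = none := by
  induction ps with
  | nil => rfl
  | cons p ps ih => simpa [pvStepB] using ih

lemma A_loop (cs : List Char) :
    ∀ (out : List Int) (idx : Int) (scratch : List Char),
      pvFinishA (cs.foldl pvStepA (some (out, idx, scratch))) = pvGo (pvSplitDot scratch cs) out idx := by
  induction cs with
  | nil =>
    intro out idx scratch
    simp only [List.foldl_nil, pvFinishA, pvSplitDot]
    cases hoc : PySem.Int.ofChars? scratch with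
    | none => simp [pvGo, hoc]
    | some v =>
      cases h : pvSetItem? out idx v with
      | none => simp [pvGo, hoc, h]
      | some out' => simp [pvGo, hoc, h]
  | cons c rest ih =>
    intro out idx scratch
    by_cases hc : c = '.'
    · subst hc
      simp only [List.foldl_cons, pvStepA, reduceIte, pvSplitDot]
      cases hoc : PySem.Int.ofChars? scratch with
      | none => simp [foldl_stepA_none, pvFinishA, pvGo, hoc]
      | some v =>
        cases h : pvSetItem? out idx v with
        | none => simp [h, foldl_stepA_none, pvFinishA, pvGo, hoc]
        | some out' => simp [h, ih, pvGo, hoc]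
    · simp [List.foldl_cons, pvStepA, hc, pvSplitDot, ih]

lemma B_loop (parts : List (List Char)) :
    ∀ (out : List Int) (idx : Int),
      (PySem.List.enumerate parts idx).foldl pvStepB (some out) = pvGo parts out idx := by
  induction parts with
  | nil => intro out idx; simp [PySem.List.enumerate_nil, pvGo]
  | cons t ts ih =>
    intro out idx
    rw [PySem.List.enumerate_cons]
    simp only [List.foldl_cons, pvStepB]
    cases hoc : PySem.Int.ofChars? t with
    | none => simp [foldl_stepB_none, pvGo, hoc]
    | some v =>
      cases h : pvSetItem? out idx v with
      | none => simp [h, foldl_stepB_none, pvGo, hoc]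
      | some out' => simp [h, ih, pvGo, hoc]

-- ===== VERDICT (by name: the statement is the Claim_ definition above) =====
theorem parse_addr_py_spec : Claim_equal_parse_addr_py := by
  intro addr _ _
  unfold Spec_parse_addr_py parse_addr_py parse_addr_py_alt
  rw [A_loop, B_loop, splitOn_eq_pvSplitDot]
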